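-- pv_equiv track=rewrite | github.com/MrBrantCode/unitest_baseline | mut_generate/mist_train_cf/cf_102776/solution.py | sum_recursive
-- ===== SOURCE A (Python) =====
-- def sum_recursive(numbers, start, end):
--     """
--     This function calculates the sum of the numbers in the list from the start index to the end index using a recursive approach.
--
--     Args:
--         numbers (list): A list of numbers.
--         start (int): The start index.
--         end (int): The end index.
--
--     Returns:
--         int: The sum of the numbers in the list from the start index to the end index.
--     """
--     if start == end:
--         return numbers[start]
--     else:
--         mid = (start + end) // 2
--         left_sum = sum_recursive(numbers, start, mid)
--         right_sum = sum_recursive(numbers, mid + 1, end)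
--         return left_sum + right_sum
-- ===== SOURCE B (Python) =====
-- def sum_recursive(numbers, start, end):
--     total = 0
--     i = start
--     while True:
--         total += numbers[i]
--         if i == end:
--             return total
--         i += 1
-- ===== Notes on version B (the rewrite author's own statement) =====
-- stated objective: simpler
-- what changed: Replaces the divide-and-conquer halving recursion with a single flat loop that accumulates numbers[i] from start until i reaches end.
import Mathlib
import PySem

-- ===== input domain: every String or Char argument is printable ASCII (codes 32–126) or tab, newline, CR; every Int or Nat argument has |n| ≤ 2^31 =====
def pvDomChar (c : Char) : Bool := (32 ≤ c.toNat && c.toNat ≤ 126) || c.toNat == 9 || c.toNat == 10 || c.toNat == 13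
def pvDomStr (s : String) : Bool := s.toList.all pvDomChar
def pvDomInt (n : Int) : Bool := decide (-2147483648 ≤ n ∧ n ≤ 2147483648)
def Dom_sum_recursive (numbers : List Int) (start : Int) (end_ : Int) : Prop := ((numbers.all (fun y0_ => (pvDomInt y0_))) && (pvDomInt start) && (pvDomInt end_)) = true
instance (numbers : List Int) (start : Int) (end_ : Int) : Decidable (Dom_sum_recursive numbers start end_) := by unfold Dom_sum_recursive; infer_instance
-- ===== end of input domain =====

-- B replaces the divide-and-conquer recursion with a single flat accumulating loop (simpler, O(1) space).

-- ===== PORT A =====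
-- A's recursion diverges when start > end (Python: RecursionError); the fuel ((end_-start).toNat+1)
-- is sufficient for every input with start ≤ end_, and the 0-on-exhaustion branch is reachable only
-- outside Pre_sum_recursive.
def sumRecAux (numbers : List Int) : Nat → Int → Int → Int
  | 0, _, _ => 0
  | fuel + 1, start, end_ =>
    if start = end_ then (PySem.List.pyGet? numbers start).getD 0
    else
      let mid := PySem.Int.floordiv (start + end_) 2
      let left_sum := sumRecAux numbers fuel start mid
      let right_sum := sumRecAux numbers fuel (mid + 1) end_
      left_sum + right_sum

def sum_recursive (numbers : List Int) (start : Int) (end_ : Int) : Int :=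
  sumRecAux numbers ((end_ - start).toNat + 1) start end_

-- ===== PORT B =====
-- The while-True loop: add numbers[i], return when i == end, else i += 1.  Python raises
-- IndexError when numbers[i] is out of range (pyGet? = none; unreachable inside Pre_, where the
-- loop keeps total unchanged and stops); it terminates because i strictly increases until i = end_
-- or i ≥ numbers.length.
def sumLoopB (numbers : List Int) (end_ : Int) (i : Int) (total : Int) : Int :=
  match h : PySem.List.pyGet? numbers i with
  | none => total
  | some v =>
    if i = end_ then total + v
    else sumLoopB numbers end_ (i + 1) (total + v)
termination_by ((numbers.length : Int) - i).toNat
decreasing_by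
  have : PySem.Raise.InRange numbers.length i := by
    by_contra hc
    simp [(PySem.List.pyGet?_eq_none_iff numbers i).mpr hc] at h
  unfold PySem.Raise.InRange at this
  omega

def sum_recursive_alt (numbers : List Int) (start : Int) (end_ : Int) : Int :=
  sumLoopB numbers end_ start 0

-- ===== PRECONDITION & SPEC =====
-- Pre_ excludes exactly the inputs where Python A raises: start > end_ (RecursionError from
-- unbounded halving) and ranges touching an index outside [-len, len) (IndexError).
def Pre_sum_recursive (numbers : List Int) (start : Int) (end_ : Int) : Prop :=
  start ≤ end_ ∧ -(numbers.length : Int) ≤ start ∧ end_ < (numbers.length : Int)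
instance (numbers : List Int) (start : Int) (end_ : Int) : Decidable (Pre_sum_recursive numbers start end_) := by unfold Pre_sum_recursive; infer_instance

def pvWitness_sum_recursive : List Int × Int × Int := ([3, -1, 4, 1, 5], 1, 3)


def Spec_sum_recursive (numbers : List Int) (start : Int) (end_ : Int) (out : Int) : Prop := out = sum_recursive_alt numbers start end_
instance (numbers : List Int) (start : Int) (end_ : Int) (out : Int) : Decidable (Spec_sum_recursive numbers start end_ out) := by unfold Spec_sum_recursive; infer_instance

-- ===== CLAIM (what is proved, stated in full; the proofs are below) =====
def Claim_equal_sum_recursive : Prop := ∀ (numbers : List Int) (start : Int) (end_ : Int), Dom_sum_recursive numbers start end_ → Pre_sum_recursive numbers start end_ → Spec_sum_recursive numbers start end_ (sum_recursive numbers start end_)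

-- ===== LEMMAS AND PROOFS =====

-- With enough fuel, A's divide-and-conquer equals the sum of numbers[i] over [start, end_].
theorem sumRecAux_eq_sum (numbers : List Int) (fuel : Nat) :
    ∀ start end_ : Int, start ≤ end_ → (end_ - start).toNat < fuel →
    sumRecAux numbers fuel start end_ =
      ((PySem.List.pyRange start (end_ + 1) 1).map
        (fun i => (PySem.List.pyGet? numbers i).getD 0)).sum := by
  induction fuel with
  | zero => intro _ _ _ h; omega
  | succ fuel ih =>
    intro start end_ hle hfuel
    by_cases heq : start = end_
    · subst heq
      rw [PySem.List.pyRange_one_singleton]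
      simp [sumRecAux]
    · have hlt : start < end_ := lt_of_le_of_ne hle heq
      have hmid := PySem.Int.floordiv_two_mid_bounds hle
      set mid := PySem.Int.floordiv (start + end_) 2 with hmiddef
      have hmidlt : mid < end_ := by
        rw [hmiddef, PySem.Int.floordiv_lt_iff_lt_mul (by omega)]
        omega
      have h1 : sumRecAux numbers fuel start mid =
          ((PySem.List.pyRange start (mid + 1) 1).map
            (fun i => (PySem.List.pyGet? numbers i).getD 0)).sum :=
        ih start mid (by omega) (by omega)
      have h2 : sumRecAux numbers fuel (mid + 1) end_ =
          ((PySem.List.pyRange (mid + 1) (end_ + 1) 1).map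
            (fun i => (PySem.List.pyGet? numbers i).getD 0)).sum :=
        ih (mid + 1) end_ (by omega) (by omega)
      have hsplit : PySem.List.pyRange start (end_ + 1) 1 =
          PySem.List.pyRange start (mid + 1) 1 ++ PySem.List.pyRange (mid + 1) (end_ + 1) 1 :=
        PySem.List.pyRange_one_append start (mid + 1) (end_ + 1) (by omega) (by omega)
      simp only [sumRecAux, if_neg heq, ← hmiddef, h1, h2, hsplit, List.map_append,
        List.sum_append]

-- B's loop, started at any i of the admitted range, adds the sum of numbers[i..end_] to total.
theorem sumLoopB_eq_sum (numbers : List Int) (end_ : Int) :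
    ∀ i total : Int, -(numbers.length : Int) ≤ i → i ≤ end_ → end_ < (numbers.length : Int) →
    sumLoopB numbers end_ i total =
      total + ((PySem.List.pyRange i (end_ + 1) 1).map
        (fun j => (PySem.List.pyGet? numbers j).getD 0)).sum := by
  intro i total hlo hi hhi
  induction hk : (end_ - i).toNat generalizing i total with
  | zero =>
    have he : end_ = i := by omega
    subst he
    rw [sumLoopB]
    split
    next h =>
      exact absurd ((PySem.List.pyGet?_eq_none_iff numbers end_).mp h)
        (by unfold PySem.Raise.InRange; omega)
    next v h =>
      simp [PySem.List.pyRange_one_singleton, h]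
  | succ k ih =>
    have hlt : i < end_ := by omega
    rw [sumLoopB]
    split
    next h =>
      exact absurd ((PySem.List.pyGet?_eq_none_iff numbers i).mp h)
        (by unfold PySem.Raise.InRange; omega)
    next v h =>
      rw [if_neg (by omega : ¬ i = end_),
        ih (i + 1) (total + v) (by omega) (by omega) (by omega),
        PySem.List.pyRange_one_cons (by omega : i < end_ + 1)]
      simp [h]
      ring

theorem alt_eq_sum (numbers : List Int) (start end_ : Int)
    (h1 : start ≤ end_) (h2 : -(numbers.length : Int) ≤ start)
    (h3 : end_ < (numbers.length : Int)) :
    sum_recursive_alt numbers start end_ =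
      ((PySem.List.pyRange start (end_ + 1) 1).map
        (fun i => (PySem.List.pyGet? numbers i).getD 0)).sum := by
  unfold sum_recursive_alt
  rw [sumLoopB_eq_sum numbers end_ start 0 h2 h1 h3]
  ring

-- ===== VERDICT (by name: the statement is the Claim_ definition above) =====
theorem sum_recursive_spec : Claim_equal_sum_recursive := by
  intro numbers start end_ _ hpre
  unfold Spec_sum_recursive sum_recursive
  rw [sumRecAux_eq_sum numbers _ start end_ hpre.1 (by omega),
    alt_eq_sum numbers start end_ hpre.1 hpre.2.1 hpre.2.2]
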